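-- pv_equiv track=rewrite | github.com/psyfb2/Chatbot | models/transformer.py | generate_segment_list
-- ===== SOURCE A (Python) =====
-- PSN = 1
--
-- MSG = 2
--
-- def generate_segment_list(encoded, pad_length, sep_index, no_persona=False):
--     ''' Generates a list of segment indicies based on the seperator index '''
--     sep_seq_found = no_persona
--     segment = []
--     c = 0
--
--     for subword_index in encoded:
--         if c >= pad_length or subword_index == 0:
--             break
--
--         if sep_seq_found:
--             # message segment
--             segment.append(MSG)
--         else:
--             # persona segment
--             segment.append(PSN)
--         if subword_index == sep_index:
--             sep_seq_found = True
--         c += 1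
--
--     # pad the segment array
--     for i in range(pad_length - len(segment)):
--         segment.append(0)
--
--     return segment
-- ===== SOURCE B (Python) =====
-- PSN = 1
--
-- MSG = 2
--
-- def generate_segment_list(encoded, pad_length, sep_index, no_persona=False):
--     ''' Locate-split-then-build: count usable prefix L, find separator position p,
--         then assemble [PSN]*(p+1) + [MSG]*(L-p-1) + [0]*(pad_length-L). '''
--     limit = min(len(encoded), max(pad_length, 0))
--     L = 0
--     while L < limit and encoded[L] != 0:
--         L += 1
--     if no_persona:
--         head = [MSG] * L
--     else:
--         try:
--             p = encoded.index(sep_index, 0, L)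
--         except ValueError:
--             p = L - 1  # no separator in range: everything is persona
--         head = [PSN] * (p + 1) + [MSG] * (L - p - 1)
--     return head + [0] * (pad_length - L)
-- ===== Notes on version B (the rewrite author's own statement) =====
-- stated objective: alternative
-- what changed: Replaces the per-element flag loop (append PSN/MSG while tracking a separator-seen flag, then a padding loop) by a locate-split-then-build strategy: count the usable prefix length L, find the first separator position p within it, and assemble the answer with list-repetition arithmetic.
import Mathlib
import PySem

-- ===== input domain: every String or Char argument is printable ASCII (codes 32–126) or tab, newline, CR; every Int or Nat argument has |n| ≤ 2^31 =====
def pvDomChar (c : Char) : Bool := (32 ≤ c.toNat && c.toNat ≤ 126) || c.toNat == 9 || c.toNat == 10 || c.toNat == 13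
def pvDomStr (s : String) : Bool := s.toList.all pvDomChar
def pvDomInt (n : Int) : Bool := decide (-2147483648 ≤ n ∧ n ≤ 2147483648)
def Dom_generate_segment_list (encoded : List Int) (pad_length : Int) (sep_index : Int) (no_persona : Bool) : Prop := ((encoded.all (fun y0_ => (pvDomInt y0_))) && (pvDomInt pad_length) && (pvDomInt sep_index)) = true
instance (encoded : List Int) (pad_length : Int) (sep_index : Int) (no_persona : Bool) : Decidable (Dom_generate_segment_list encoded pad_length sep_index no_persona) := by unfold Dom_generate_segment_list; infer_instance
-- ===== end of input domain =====

-- B replaces A's per-element flag loop by a locate-split-then-build construction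
-- (count prefix L, find separator position p, assemble with replication); objective: alternative.

-- ===== PORT A =====
def PSN : Int := 1
def MSG : Int := 2

-- the for-loop of A: state = (sep_seq_found, segment, c), break on c >= pad_length or zero token
def gslA_loop (pad_length sep_index : Int) : List Int → Bool → List Int → Int → List Int
  | [], _, segment, _ => segment
  | x :: xs, sep_seq_found, segment, c =>
    if c ≥ pad_length ∨ x = 0 then segment
    else
      gslA_loop pad_length sep_index xs
        (if x = sep_index then true else sep_seq_found)
        (segment ++ [if sep_seq_found then MSG else PSN])
        (c + 1)

def generate_segment_list (encoded : List Int) (pad_length : Int) (sep_index : Int) (no_persona : Bool) : List Int :=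
  let segment := gslA_loop pad_length sep_index encoded no_persona [] 0
  -- for i in range(pad_length - len(segment)): segment.append(0)
  segment ++ List.replicate (pad_length - (segment.length : Int)).toNat 0

-- ===== PORT B =====
-- the while loop of B: L advances while L < limit and encoded[L] != 0 (fuel = limit)
def gslB_scan : List Int → Nat → Nat
  | _, 0 => 0
  | [], _ + 1 => 0
  | x :: xs, n + 1 => if x = 0 then 0 else gslB_scan xs n + 1

def generate_segment_list_alt (encoded : List Int) (pad_length : Int) (sep_index : Int) (no_persona : Bool) : List Int :=
  -- limit = min(len(encoded), max(pad_length, 0)); Int.toNat is exactly max(·,0)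
  let limit : Nat := min encoded.length pad_length.toNat
  let L : Nat := gslB_scan encoded limit
  let head : List Int :=
    if no_persona then List.replicate L MSG
    else
      -- p = encoded.index(sep_index, 0, L), except ValueError: p = L - 1
      let p : Int :=
        match PySem.List.index? (encoded.take L) sep_index with
        | some i => (i : Int)
        | none => (L : Int) - 1
      List.replicate (p + 1).toNat PSN ++ List.replicate ((L : Int) - p - 1).toNat MSG
  head ++ List.replicate (pad_length - (L : Int)).toNat 0

-- ===== PRECONDITION & SPEC =====
def Spec_generate_segment_list (encoded : List Int) (pad_length : Int) (sep_index : Int) (no_persona : Bool) (out : List Int) : Prop := out = generate_segment_list_alt encoded pad_length sep_index no_persona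
instance (encoded : List Int) (pad_length : Int) (sep_index : Int) (no_persona : Bool) (out : List Int) : Decidable (Spec_generate_segment_list encoded pad_length sep_index no_persona out) := by unfold Spec_generate_segment_list; infer_instance

-- ===== CLAIM (what is proved, stated in full; the proofs are below) =====
def Claim_equal_generate_segment_list : Prop := ∀ (encoded : List Int) (pad_length : Int) (sep_index : Int) (no_persona : Bool), Dom_generate_segment_list encoded pad_length sep_index no_persona → Spec_generate_segment_list encoded pad_length sep_index no_persona (generate_segment_list encoded pad_length sep_index no_persona)

-- ===== LEMMAS AND PROOFS =====

-- accumulator-free version of A's loop, with Nat fuel = remaining budget (pad_length - c)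
def gslFA (sep_index : Int) : List Int → Bool → Nat → List Int
  | [], _, _ => []
  | _ :: _, _, 0 => []
  | x :: xs, f, n + 1 =>
    if x = 0 then []
    else (if f then MSG else PSN) :: gslFA sep_index xs (if x = sep_index then true else f) n

theorem gslA_loop_eq_fA (s : Int) (xs : List Int) : ∀ (p : Int) (f : Bool) (seg : List Int) (c : Int),
    gslA_loop p s xs f seg c = seg ++ gslFA s xs f (p - c).toNat := by
  induction xs with
  | nil => intro p f seg c; simp [gslA_loop, gslFA]
  | cons x xs ih =>
    intro p f seg c
    by_cases h : c ≥ p ∨ x = 0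
    · rw [gslA_loop, if_pos h]
      rcases h with h | h
      · have : (p - c).toNat = 0 := by omega
        rw [this]; simp [gslFA]
      · cases hn : (p - c).toNat with
        | zero => simp [gslFA]
        | succ n => simp [gslFA, h]
    · rw [not_or] at h
      obtain ⟨h1, h2⟩ := h
      rw [gslA_loop, if_neg (by rw [not_or]; exact ⟨h1, h2⟩)]
      rw [not_le] at h1
      have hn : (p - c).toNat = (p - (c + 1)).toNat + 1 := by omega
      rw [ih, hn, gslFA, if_neg h2, List.append_assoc]
      simp

theorem gslFA_true (s : Int) (xs : List Int) : ∀ n, gslFA s xs true n = List.replicate (gslB_scan xs n) MSG := by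
  induction xs with
  | nil => intro n; cases n <;> simp [gslFA, gslB_scan]
  | cons x xs ih =>
    intro n
    cases n with
    | zero => simp [gslFA, gslB_scan]
    | succ n =>
      by_cases h : x = 0
      · simp [gslFA, gslB_scan, h]
      · simp [gslFA, gslB_scan, h, ih, List.replicate_succ]

-- B's head (no_persona = false) as a function of the prefix length L, in Nat arithmetic
def gslHead (s : Int) (xs : List Int) (L : Nat) : List Int :=
  match PySem.List.index? (xs.take L) s with
  | none => List.replicate L PSN
  | some i => List.replicate (i + 1) PSN ++ List.replicate (L - i - 1) MSG

theorem gslFA_false (s : Int) (xs : List Int) : ∀ n, gslFA s xs false n = gslHead s xs (gslB_scan xs n) := by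
  induction xs with
  | nil => intro n; cases n <;> simp [gslFA, gslB_scan, gslHead, PySem.List.index?]
  | cons x xs ih =>
    intro n
    cases n with
    | zero => simp [gslFA, gslB_scan, gslHead, PySem.List.index?]
    | succ n =>
      by_cases h : x = 0
      · simp [gslFA, gslB_scan, h, gslHead, PySem.List.index?]
      · rw [gslFA, if_neg h, gslB_scan, if_neg h]
        by_cases hs : x = s
        · subst hs
          rw [if_pos rfl, gslFA_true]
          unfold gslHead
          rw [List.take_succ_cons, PySem.List.index?_cons_self]
          simp [List.replicate_succ]
        · rw [if_neg hs, ih]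
          unfold gslHead
          rw [List.take_succ_cons, PySem.List.index?_cons_of_ne _ hs]
          cases hidx : PySem.List.index? (xs.take (gslB_scan xs n)) s with
          | none => simp [List.replicate_succ]
          | some i => simp [List.replicate_succ]

theorem gslFA_length (s : Int) (xs : List Int) : ∀ (f : Bool) (n : Nat), (gslFA s xs f n).length = gslB_scan xs n := by
  induction xs with
  | nil => intro f n; cases n <;> simp [gslFA, gslB_scan]
  | cons x xs ih =>
    intro f n
    cases n with
    | zero => simp [gslFA, gslB_scan]
    | succ n =>
      by_cases h : x = 0
      · simp [gslFA, gslB_scan, h]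
      · simp [gslFA, gslB_scan, h, ih]

theorem gslB_scan_min (xs : List Int) : ∀ n, gslB_scan xs (min xs.length n) = gslB_scan xs n := by
  induction xs with
  | nil => intro n; cases n <;> simp [gslB_scan]
  | cons x xs ih =>
    intro n
    cases n with
    | zero => simp [gslB_scan]
    | succ n =>
      have hmin : min (x :: xs).length (n + 1) = min xs.length n + 1 := by
        simp [List.length_cons]
      rw [hmin]
      by_cases h : x = 0 <;> simp [gslB_scan, h, ih]

-- ===== VERDICT (by name: the statement is the Claim_ definition above) =====
theorem generate_segment_list_spec : Claim_equal_generate_segment_list := by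
  intro encoded pad_length sep_index no_persona _
  unfold Spec_generate_segment_list
  simp only [generate_segment_list, generate_segment_list_alt]
  rw [gslA_loop_eq_fA, List.nil_append, Int.sub_zero, gslB_scan_min, gslFA_length]
  cases no_persona with
  | true =>
    rw [gslFA_true]
    simp
  | false =>
    simp only [Bool.false_eq_true, if_false]
    rw [gslFA_false]
    congr 1
    unfold gslHead
    cases hidx : PySem.List.index? (encoded.take (gslB_scan encoded pad_length.toNat)) sep_index with
    | none => simp
    | some i => simp
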